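-- pv_equiv track=rewrite | github.com/imatge-upc/danifojo-2018-repeatrnn | add2.py | vec2num
-- ===== SOURCE A (Python) =====
-- def vec2num(x):
--     s = 0
--     for i in range(len(x)):
--         if x[i] == -1:
--             break
--         s *= 10
--         s += x[i]
--     return s
-- ===== SOURCE B (Python) =====
-- def vec2num(x):
--     try:
--         k = x.index(-1)
--     except ValueError:
--         k = len(x)
--     total, weight = 0, 1
--     for d in reversed(x[:k]):
--         total += d * weight
--         weight *= 10
--     return total
-- ===== Notes on version B (the rewrite author's own statement) =====
-- stated objective: alternative
-- what changed: Replaces A's fused left-to-right Horner break-loop (s = s*10 + d until -1) by first locating the -1 sentinel with list.index and slicing the prefix, then summing it right-to-left positionally with a running power-of-ten weight.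
import Mathlib
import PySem

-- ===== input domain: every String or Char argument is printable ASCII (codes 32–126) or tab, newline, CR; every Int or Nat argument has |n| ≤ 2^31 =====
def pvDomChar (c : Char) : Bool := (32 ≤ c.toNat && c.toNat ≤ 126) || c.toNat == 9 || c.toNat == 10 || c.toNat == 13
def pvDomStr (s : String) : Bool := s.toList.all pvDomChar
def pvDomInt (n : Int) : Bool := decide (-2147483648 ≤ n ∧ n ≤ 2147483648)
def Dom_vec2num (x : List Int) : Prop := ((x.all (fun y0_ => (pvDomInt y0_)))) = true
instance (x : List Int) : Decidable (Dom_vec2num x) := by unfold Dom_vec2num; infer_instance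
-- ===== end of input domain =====

-- B locates the -1 sentinel by index, slices the prefix, and sums it right-to-left
-- positionally with a running power-of-ten weight; a different algorithm from A's
-- left-to-right Horner break-loop, same O(n) cost.

-- ===== PORT A =====
-- A's index loop with break, as structural recursion carrying the accumulator s
def vec2numGo (s : Int) : List Int → Int
  | [] => s
  | d :: t => if d = -1 then s else vec2numGo (s * 10 + d) t

def vec2num (x : List Int) : Int := vec2numGo 0 x

-- ===== PORT B =====
-- k = x.index(-1), or len(x) if ValueError
def vec2numK (x : List Int) : Nat :=
  match PySem.List.index? x (-1) with
  | some i => i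
  | none => x.length

-- the for-loop over reversed(x[:k]) carrying (total, weight); x[:k] with 0 ≤ k ≤ len(x)
-- is List.take k (exact), reversed(...) is List.reverse.
def vec2num_alt (x : List Int) : Int :=
  let k := vec2numK x
  (((x.take k).reverse).foldl (fun p d => (p.1 + d * p.2, p.2 * 10)) ((0:Int), (1:Int))).1

-- ===== PRECONDITION & SPEC =====
def Spec_vec2num (x : List Int) (out : Int) : Prop := out = vec2num_alt x
instance (x : List Int) (out : Int) : Decidable (Spec_vec2num x out) := by unfold Spec_vec2num; infer_instance

-- ===== CLAIM (what is proved, stated in full; the proofs are below) =====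
def Claim_equal_vec2num : Prop := ∀ (x : List Int), Dom_vec2num x → Spec_vec2num x (vec2num x)

-- ===== LEMMAS AND PROOFS =====
-- reference value: num l = the decimal number with digit list l
def pvNum : List Int → Int
  | [] => 0
  | d :: t => d * (10:Int) ^ t.length + pvNum t

theorem vec2numGo_eq (x : List Int) : ∀ (s : Int),
    vec2numGo s x = s * (10:Int) ^ (x.takeWhile (fun d => d ≠ -1)).length
      + pvNum (x.takeWhile (fun d => d ≠ -1)) := by
  induction x with
  | nil => intro s; simp [vec2numGo, pvNum]
  | cons d t ih =>
    intro s
    by_cases h : d = -1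
    · simp [vec2numGo, List.takeWhile, h, pvNum]
    · have htw : (d::t).takeWhile (fun d => d ≠ -1) = d :: t.takeWhile (fun d => d ≠ -1) := by
        simp [h]
      rw [htw]
      simp only [vec2numGo, if_neg h, ih, List.length_cons, pvNum]
      ring

theorem takeWhile_eq_take (x : List Int) :
    x.takeWhile (fun d => d ≠ -1) = x.take (vec2numK x) := by
  unfold vec2numK
  rcases h : PySem.List.index? x (-1) with _ | i
  · have hmem : (-1 : Int) ∉ x := (PySem.List.index?_eq_none_iff x (-1)).1 h
    rw [List.take_length, List.takeWhile_eq_self_iff.2]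
    intro a ha; simp [show a ≠ -1 from fun hc => hmem (hc ▸ ha)]
  · obtain ⟨pre, suf, hx, hlen, hpre⟩ := (PySem.List.index?_eq_some_iff x (-1) i).1 h
    subst hx; subst hlen
    have hall : pre.takeWhile (fun d => d ≠ -1) = pre := by
      apply List.takeWhile_eq_self_iff.2
      intro a ha; simp [show a ≠ -1 from fun hc => hpre (hc ▸ ha)]
    rw [List.take_left, List.takeWhile_append, if_pos (by rw [hall])]
    simp [List.takeWhile]

-- little-endian value of a digit list
def pvLE : List Int → Int
  | [] => 0
  | d :: t => d + 10 * pvLE t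

theorem revfold (l : List Int) : ∀ (t w : Int),
    (l.foldl (fun p d => (p.1 + d * p.2, p.2 * 10)) (t, w)).1 = t + pvLE l * w := by
  induction l with
  | nil => intro t w; simp [pvLE]
  | cons d r ih =>
    intro t w
    simp only [List.foldl_cons, ih, pvLE]
    ring

theorem pvLE_append (a b : List Int) :
    pvLE (a ++ b) = pvLE a + (10:Int) ^ a.length * pvLE b := by
  induction a with
  | nil => simp [pvLE]
  | cons d t ih => simp [pvLE, ih]; ring

theorem pvLE_reverse (l : List Int) : pvLE l.reverse = pvNum l := by
  induction l with
  | nil => simp [pvLE, pvNum]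
  | cons d t ih =>
    simp [List.reverse_cons, pvLE_append, ih, pvLE, pvNum]
    ring

-- ===== VERDICT (by name: the statement is the Claim_ definition above) =====
theorem vec2num_spec : Claim_equal_vec2num := by
  intro x _
  unfold Spec_vec2num vec2num vec2num_alt
  rw [vec2numGo_eq, takeWhile_eq_take]
  simp only [revfold, pvLE_reverse]
  ring
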